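-- pv_equiv track=rewrite | github.com/handaeho/lab_python | EX00000/ex) 124나라.py | solution
-- ===== SOURCE A (Python) =====
-- def solution(n):
--     answer = ''
--     while n:
--         n, na = divmod(n, 3)
--         answer = '412'[na] + answer
--         if not na:
--             n -= 1
--     return answer
-- ===== SOURCE B (Python) =====
-- def solution(n):
--     if n == 0:
--         return ''
--     q, r = divmod(n - 1, 3)
--     return solution(q) + '124'[r]
-- ===== Notes on version B (the rewrite author's own statement) =====
-- stated objective: simpler
-- what changed: Replaced the back-to-front digit-peeling while loop with its carry decrement by a short recursion over the quotient of divmod(n-1,3) that appends one digit per call.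
import Mathlib
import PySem

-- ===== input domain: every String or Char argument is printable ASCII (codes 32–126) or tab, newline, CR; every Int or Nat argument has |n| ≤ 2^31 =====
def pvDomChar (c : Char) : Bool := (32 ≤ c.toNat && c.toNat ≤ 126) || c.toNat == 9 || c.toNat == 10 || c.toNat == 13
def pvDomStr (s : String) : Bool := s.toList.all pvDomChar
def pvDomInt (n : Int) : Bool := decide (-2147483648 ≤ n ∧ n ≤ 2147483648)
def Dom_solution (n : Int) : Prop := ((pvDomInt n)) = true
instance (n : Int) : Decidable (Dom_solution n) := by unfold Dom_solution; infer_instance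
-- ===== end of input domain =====

-- B replaces A's digit-peeling while loop (prepend digit, decrement on zero remainder)
-- by a recursion over the quotient of divmod(n-1,3); objective: simpler.

-- ===== PORT A =====
-- A's while loop: 'while n': for n > 0, divmod by 3, prepend '412'[na], decrement on na = 0.
-- The 'n < 0' branch is a totality guard only: the Python loop never terminates there (outside Pre_).
def solutionLoop (n : Int) (answer : String) : String :=
  if n ≤ 0 then answer
  else
    let na := PySem.Int.mod n 3
    let n' := PySem.Int.floordiv n 3
    let answer' := (((PySem.Str.pyGet? "412" na).getD ' ').toString) ++ answer
    if na = 0 then solutionLoop (n' - 1) answer' else solutionLoop n' answer'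
termination_by n.toNat
decreasing_by
  all_goals
    simp only [PySem.Int.floordiv_eq_ediv_of_pos (by omega : (0:Int) < 3)] at *
    omega

def solution (n : Int) : String := solutionLoop n ""

-- ===== PORT B =====
-- B's recursion: solution(0) = '', else q, r = divmod(n-1, 3); solution(q) + '124'[r].
-- The 'n < 0' branch is a totality guard only (Python's recursion does not return there; outside Pre_).
def solution_alt (n : Int) : String :=
  if n = 0 then ""
  else if n < 0 then ""
  else
    let q := PySem.Int.floordiv (n - 1) 3
    let r := PySem.Int.mod (n - 1) 3
    solution_alt q ++ (((PySem.Str.pyGet? "124" r).getD ' ').toString)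
termination_by n.toNat
decreasing_by
  simp only [PySem.Int.floordiv_eq_ediv_of_pos (by omega : (0:Int) < 3)] at *
  omega

-- ===== PRECONDITION & SPEC =====
-- Pre_ excludes negative n, on which A's while loop never terminates (no value is returned).
def Pre_solution (n : Int) : Prop := 0 ≤ n
instance (n : Int) : Decidable (Pre_solution n) := by unfold Pre_solution; infer_instance
def pvWitness_solution : Int := (10)

def Spec_solution (n : Int) (out : String) : Prop := out = solution_alt n
instance (n : Int) (out : String) : Decidable (Spec_solution n out) := by unfold Spec_solution; infer_instance

-- ===== CLAIM (what is proved, stated in full; the proofs are below) =====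
def Claim_equal_solution : Prop := ∀ (n : Int), Dom_solution n → Pre_solution n → Spec_solution n (solution n)

-- ===== LEMMAS AND PROOFS =====

-- Main loop invariant: for 0 ≤ n, A's loop with accumulator `answer` computes B's string prepended.
theorem solutionLoop_eq (n : Int) (hn : 0 ≤ n) (answer : String) :
    solutionLoop n answer = solution_alt n ++ answer := by
  by_cases h0 : n = 0
  · subst h0
    rw [solutionLoop, solution_alt]
    simp
  · have hpos : 0 < n := by omega
    have h3 : (0:Int) < 3 := by omega
    rw [solutionLoop, solution_alt]
    simp only [PySem.Int.mod_eq_emod_of_pos h3, PySem.Int.floordiv_eq_ediv_of_pos h3]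
    have hq : 0 ≤ n / 3 := Int.ediv_nonneg (by omega) (by omega)
    have hmod := Int.emod_emod_of_dvd n (dvd_refl 3)
    have hlt : n % 3 < 3 := Int.emod_lt_of_pos n h3
    have hge : 0 ≤ n % 3 := Int.emod_nonneg n (by omega)
    have key : 3 * (n / 3) + n % 3 = n := Int.ediv_add_emod n 3 ▸ by omega
    interval_cases hna : (n % 3)
    · -- na = 0 : A prepends '4' and recurses on n/3 - 1; B: (n-1)%3 = 2, (n-1)/3 = n/3 - 1
      have e1 : (n - 1) % 3 = 2 := by omega
      have e2 : (n - 1) / 3 = n / 3 - 1 := by omega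
      rw [e1, e2]
      have : 0 ≤ n / 3 - 1 := by omega
      rw [solutionLoop_eq (n / 3 - 1) this]
      simp [if_neg h0, if_neg (by omega : ¬ n < 0), String.push, String.singleton,
        String.append_assoc, PySem.Str.pyGet?, PySem.Chars.pyGet?,
        PySem.List.pyGet?, PySem.List.pyIdx?]
      exact fun h => absurd h (by omega)
    · -- na = 1 : A prepends '1', recurses on n/3; B: (n-1)%3 = 0, (n-1)/3 = n/3
      have e1 : (n - 1) % 3 = 0 := by omega
      have e2 : (n - 1) / 3 = n / 3 := by omega
      rw [e1, e2, solutionLoop_eq (n / 3) hq]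
      simp [if_neg h0, if_neg (by omega : ¬ n < 0), String.push, String.singleton,
        String.append_assoc, PySem.Str.pyGet?, PySem.Chars.pyGet?,
        PySem.List.pyGet?, PySem.List.pyIdx?]
      exact fun h => absurd h (by omega)
    · -- na = 2 : A prepends '2', recurses on n/3; B: (n-1)%3 = 1, (n-1)/3 = n/3
      have e1 : (n - 1) % 3 = 1 := by omega
      have e2 : (n - 1) / 3 = n / 3 := by omega
      rw [e1, e2, solutionLoop_eq (n / 3) hq]
      simp [if_neg h0, if_neg (by omega : ¬ n < 0), String.push, String.singleton,
        String.append_assoc, PySem.Str.pyGet?, PySem.Chars.pyGet?,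
        PySem.List.pyGet?, PySem.List.pyIdx?]
      exact fun h => absurd h (by omega)
termination_by n.toNat
decreasing_by all_goals omega

-- ===== VERDICT (by name: the statement is the Claim_ definition above) =====
theorem solution_spec : Claim_equal_solution := by
  intro n _ hpre
  unfold Spec_solution solution
  rw [solutionLoop_eq n hpre]
  simp
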